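-- pv_equiv track=rewrite | github.com/tiru777/PythonDSA | basic.py | even_index_upper
-- ===== SOURCE A (Python) =====
-- def even_index_upper(s: str):
--     data = ""
--     for index, i in enumerate(s):
--         if index % 2 == 0:
--             data = data + i.upper()
--         else:
--             data = data + i
--     # for i in range(len(s)):
--     #     if i % 2 == 0:
--     #         data = data + s[i].upper()
--     #     else:
--     #         data = data + s[i]
--     return data
-- ===== SOURCE B (Python) =====
-- def even_index_upper(s: str):
--     # Consume the string two characters at a time from an iterator:
--     # uppercase the first of each pair, keep the second; no index, no % test.
--     it = iter(s)
--     parts = []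
--     for e in it:
--         parts.append(e.upper())
--         o = next(it, None)
--         if o is not None:
--             parts.append(o)
--     return "".join(parts)
-- ===== Notes on version B (the rewrite author's own statement) =====
-- stated objective: alternative
-- what changed: Replaces the enumerate loop with a per-index parity test and quadratic string concatenation by a pairwise iterator consumption (uppercase first of each pair, keep second) collected in a list and joined once.
import Mathlib
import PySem

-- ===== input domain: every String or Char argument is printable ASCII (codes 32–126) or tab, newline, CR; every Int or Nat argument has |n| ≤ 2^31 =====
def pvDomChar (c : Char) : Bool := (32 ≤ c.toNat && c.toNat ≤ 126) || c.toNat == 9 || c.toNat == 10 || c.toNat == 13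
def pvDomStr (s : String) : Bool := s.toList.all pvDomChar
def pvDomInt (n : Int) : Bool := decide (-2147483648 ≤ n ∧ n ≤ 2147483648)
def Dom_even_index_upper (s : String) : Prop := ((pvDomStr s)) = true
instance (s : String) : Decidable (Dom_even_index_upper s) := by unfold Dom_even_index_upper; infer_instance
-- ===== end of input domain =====

-- B consumes the string two characters at a time (uppercase first of each pair, keep second),
-- replacing A's per-index parity test; objective: alternative decomposition, same asymptotic cost.

-- ===== PORT A =====
-- A: data = ""; for index, i in enumerate(s): data += i.upper() if index % 2 == 0 else i
def even_index_upper (s : String) : String :=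
  String.ofList ((PySem.List.enumerate s.toList 0).foldl
    (fun data p =>
      if PySem.Int.mod p.1 2 = 0 then data ++ [PySem.Chars.upperChar p.2]
      else data ++ [p.2]) [])

-- ===== PORT B =====
-- B's loop: for e in it: parts.append(e.upper()); o = next(it, None); if o is not None: parts.append(o)
def evenIndexUpperGo (acc : List Char) : List Char → List Char
  | [] => acc
  | [e] => acc ++ [PySem.Chars.upperChar e]
  | e :: o :: rest => evenIndexUpperGo (acc ++ [PySem.Chars.upperChar e, o]) rest

def even_index_upper_alt (s : String) : String :=
  String.ofList (evenIndexUpperGo [] s.toList)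

-- ===== PRECONDITION & SPEC =====
def Spec_even_index_upper (s : String) (out : String) : Prop := out = even_index_upper_alt s
instance (s : String) (out : String) : Decidable (Spec_even_index_upper s out) := by unfold Spec_even_index_upper; infer_instance

-- ===== CLAIM (what is proved, stated in full; the proofs are below) =====
def Claim_equal_even_index_upper : Prop := ∀ (s : String), Dom_even_index_upper s → Spec_even_index_upper s (even_index_upper s)

-- ===== LEMMAS AND PROOFS =====
theorem evenIndexUpper_fold_eq_go :
    ∀ (t : List Char) (acc : List Char) (k : Int), PySem.Int.mod k 2 = 0 →
      (PySem.List.enumerate t k).foldl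
        (fun data p =>
          if PySem.Int.mod p.1 2 = 0 then data ++ [PySem.Chars.upperChar p.2]
          else data ++ [p.2]) acc = evenIndexUpperGo acc t
  | [], acc, k, hk => by simp [PySem.List.enumerate_nil, evenIndexUpperGo]
  | [e], acc, k, hk => by
      rw [PySem.List.enumerate_cons, PySem.List.enumerate_nil]
      simp only [List.foldl_cons, List.foldl_nil]
      rw [if_pos hk]
      simp [evenIndexUpperGo]
  | e :: o :: rest, acc, k, hk => by
      have h2 : (0:Int) < 2 := by norm_num
      have hk' : k % 2 = 0 := by rw [PySem.Int.mod_eq_emod_of_pos h2] at hk; exact hk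
      have ho : PySem.Int.mod (k + 1) 2 ≠ 0 := by
        rw [PySem.Int.mod_eq_emod_of_pos h2]; omega
      have he2 : PySem.Int.mod (k + 1 + 1) 2 = 0 := by
        rw [PySem.Int.mod_eq_emod_of_pos h2]; omega
      rw [PySem.List.enumerate_cons, PySem.List.enumerate_cons]
      simp only [List.foldl_cons]
      rw [if_pos hk, if_neg ho]
      rw [evenIndexUpper_fold_eq_go rest _ (k + 1 + 1) he2]
      simp [evenIndexUpperGo, List.append_assoc]

-- ===== VERDICT (by name: the statement is the Claim_ definition above) =====
theorem even_index_upper_spec : Claim_equal_even_index_upper := by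
  intro s _
  unfold Spec_even_index_upper even_index_upper even_index_upper_alt
  rw [evenIndexUpper_fold_eq_go s.toList [] 0 (by decide)]
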